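-- pv_equiv track=rewrite | github.com/h3lim/CodingProblems | Programmers/크레인 인형뽑기 게임.py | solution
-- ===== SOURCE A (Python) =====
-- from collections import defaultdict
--
-- def solution(board, moves):
--     dic = defaultdict(list)
--     board = board[::-1]
--     stack = []
--     for i in range(len(board)):
--         for j in range(len(board)):
--             if board[i][j] != 0:
--                 dic[j].append(board[i][j])
--
--     ans = 0
--     for i in moves:
--         if len(dic[i - 1]) > 0:
--             stack.append(dic[i - 1].pop())
--
--         if len(stack) >= 2 and stack[-1] == stack[-2]:
--             stack.pop()
--             stack.pop()
--             ans += 1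
--
--     return ans * 2
-- ===== SOURCE B (Python) =====
-- def solution(board, moves):
--     # Per-column row pointers into the original board: scan each column on demand,
--     # instead of reversing the board and prebuilding per-column stacks.
--     n = len(board)
--     top = [0] * n
--     stack = []
--     pairs = 0
--     for m in moves:
--         col = m - 1
--         if 0 <= col < n:
--             r = top[col]
--             while r < n and board[r][col] == 0:
--                 r += 1
--             if r < n:
--                 doll = board[r][col]
--                 top[col] = r + 1
--                 if stack and stack[-1] == doll:
--                     stack.pop()
--                     pairs += 1
--                 else:
--                     stack.append(doll)
--     return pairs * 2
-- ===== Notes on version B (the rewrite author's own statement) =====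
-- stated objective: alternative
-- what changed: Instead of reversing the board and prebuilding per-column stacks in a defaultdict, B keeps a per-column row-pointer array into the original board and scans each column downward on demand, pairing dolls with a match-or-push stack instead of push-then-check-top-two.
import Mathlib
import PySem

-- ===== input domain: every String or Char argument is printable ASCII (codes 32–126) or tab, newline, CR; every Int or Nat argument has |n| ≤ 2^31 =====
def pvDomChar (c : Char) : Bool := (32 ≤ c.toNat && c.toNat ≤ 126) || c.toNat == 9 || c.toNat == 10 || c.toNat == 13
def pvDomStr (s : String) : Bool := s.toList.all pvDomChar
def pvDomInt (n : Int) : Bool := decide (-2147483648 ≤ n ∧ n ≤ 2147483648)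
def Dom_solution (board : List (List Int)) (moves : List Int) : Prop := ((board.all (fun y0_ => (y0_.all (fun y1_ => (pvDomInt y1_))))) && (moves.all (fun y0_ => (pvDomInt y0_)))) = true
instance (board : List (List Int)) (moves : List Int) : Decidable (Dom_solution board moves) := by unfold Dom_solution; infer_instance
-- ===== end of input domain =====

-- B replaces A's reversed-board + prebuilt per-column defaultdict stacks by per-column row
-- pointers into the original board, scanned on demand (alternative decomposition, same cost).

-- board[r][col] : shared cell accessor (none = IndexError, excluded by Pre_solution)
def pvCell (board : List (List Int)) (r col : Int) : Option Int :=
  (PySem.List.pyGet? board r).bind fun row => PySem.List.pyGet? row col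

-- ===== PORT A =====
-- the body of A's 'for i in moves' loop
def solAStep (s : PySem.Dict Int (List Int) × List Int × Int) (i : Int) :
    PySem.Dict Int (List Int) × List Int × Int :=
  let dic := s.1
  let stack := s.2.1
  let ans := s.2.2
  let l := dic.getD (i - 1) []                      -- dic[i-1] (defaultdict: default [])
  -- if len(dic[i-1]) > 0: stack.append(dic[i-1].pop())
  let dic2 := if 0 < l.length then dic.insert (i - 1) l.dropLast else dic
  let stack2 := if 0 < l.length then stack ++ [l.getLast?.getD 0] else stack
  -- if len(stack) >= 2 and stack[-1] == stack[-2]: pop; pop; ans += 1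
  if 2 ≤ stack2.length ∧ PySem.List.pyGet? stack2 (-1) = PySem.List.pyGet? stack2 (-2) then
    (dic2, stack2.dropLast.dropLast, ans + 1)
  else (dic2, stack2, ans)

def solution (board : List (List Int)) (moves : List Int) : Int :=
  -- board = board[::-1]  (step -1 ≠ 0, so slice? is always some)
  let board := (PySem.List.slice? board none none (-1)).getD []
  let n : Int := board.length
  -- for i in range(len(board)): for j in range(len(board)): if board[i][j] != 0: dic[j].append(board[i][j])
  let dic := (PySem.List.pyRange 0 n 1).foldl (fun dic i =>
    (PySem.List.pyRange 0 n 1).foldl (fun dic j =>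
      match pvCell board i j with
      | some v => if v ≠ 0 then dic.insert j (dic.getD j [] ++ [v]) else dic
      | none => dic                                 -- IndexError; unreachable under Pre_solution
    ) dic) PySem.Dict.empty
  let res := moves.foldl solAStep (dic, ([] : List Int), (0 : Int))
  res.2.2 * 2

-- ===== PORT B =====
-- while r < n and board[r][col] == 0: r += 1
def pvAdvance (board : List (List Int)) (col n r : Int) : Int :=
  if r < n then
    match pvCell board r col with
    | some v => if v = 0 then pvAdvance board col n (r + 1) else r
    | none => r                                     -- IndexError; unreachable under Pre_solution
  else r
termination_by (n - r).toNat
decreasing_by omega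

-- the body of B's 'for m in moves' loop
def solBStep (board : List (List Int)) (n : Int) (s : List Int × List Int × Int) (m : Int) :
    List Int × List Int × Int :=
  let top := s.1
  let stack := s.2.1
  let pairs := s.2.2
  let col := m - 1
  if 0 ≤ col ∧ col < n then
    let r := pvAdvance board col n ((PySem.List.pyGet? top col).getD 0)   -- r = top[col]; while …
    if r < n then
      let doll := (pvCell board r col).getD 0       -- board[r][col]
      let top2 := PySem.List.pySetD top col (r + 1) -- top[col] = r + 1
      if stack ≠ [] ∧ PySem.List.pyGet? stack (-1) = some doll then
        (top2, stack.dropLast, pairs + 1)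
      else (top2, stack ++ [doll], pairs)
    else s
  else s

def solution_alt (board : List (List Int)) (moves : List Int) : Int :=
  let n : Int := board.length
  let res := moves.foldl (solBStep board n)
    (List.replicate board.length (0 : Int), ([] : List Int), (0 : Int))
  res.2.2 * 2

-- ===== PRECONDITION & SPEC =====
-- Pre_solution is exactly A's return domain: A indexes every row at columns 0..len(board)-1,
-- raising IndexError iff some row is shorter than the number of rows.
def Pre_solution (board : List (List Int)) (moves : List Int) : Prop :=
  ∀ row ∈ board, board.length ≤ row.length
instance (board : List (List Int)) (moves : List Int) : Decidable (Pre_solution board moves) := by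
  unfold Pre_solution; infer_instance

def pvWitness_solution : List (List Int) × List Int :=
  ([[0, 3], [2, 3]], [1, 2, 2, 1])

def Spec_solution (board : List (List Int)) (moves : List Int) (out : Int) : Prop := out = solution_alt board moves
instance (board : List (List Int)) (moves : List Int) (out : Int) : Decidable (Spec_solution board moves out) := by unfold Spec_solution; infer_instance

-- ===== CLAIM (what is proved, stated in full; the proofs are below) =====
def Claim_equal_solution : Prop := ∀ (board : List (List Int)) (moves : List Int), Dom_solution board moves → Pre_solution board moves → Spec_solution board moves (solution board moves)

-- ===== LEMMAS AND PROOFS =====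

-- the nonzero cells of column `col`, rows r..n-1 top-down (proof-side model of both programs)
def colFrom (board : List (List Int)) (n col r : Int) : List Int :=
  if r < n then
    match pvCell board r col with
    | some v => if v = 0 then colFrom board n col (r + 1) else v :: colFrom board n col (r + 1)
    | none => []
  else []
termination_by (n - r).toNat
decreasing_by omega

lemma cell_isSome (board : List (List Int)) (r c : Int)
    (hpre : ∀ row ∈ board, board.length ≤ row.length)
    (hr0 : 0 ≤ r) (hr : r < (board.length : Int)) (hc0 : 0 ≤ c) (hc : c < (board.length : Int)) :
    ∃ v, pvCell board r c = some v := by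
  have hrn : r.toNat < board.length := by omega
  have h1 : PySem.List.pyGet? board r = some board[r.toNat] := by
    rw [PySem.List.pyGet?_of_nonneg _ hr0]
    exact List.getElem?_eq_getElem hrn
  have hmem : board[r.toNat] ∈ board := List.getElem_mem hrn
  have hrow := hpre _ hmem
  have hcn : c.toNat < board[r.toNat].length := by omega
  refine ⟨board[r.toNat][c.toNat], ?_⟩
  simp only [pvCell, h1, Option.bind_some]
  rw [PySem.List.pyGet?_of_nonneg _ hc0]
  exact List.getElem?_eq_getElem hcn

lemma adv_spec (board : List (List Int)) (n col : Int)
    (hcell : ∀ i : Int, 0 ≤ i → i < n → (pvCell board i col).isSome) :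
    ∀ r : Int, 0 ≤ r →
      (colFrom board n col r = [] → ¬ pvAdvance board col n r < n) ∧
      (∀ v rest, colFrom board n col r = v :: rest →
        r ≤ pvAdvance board col n r ∧ pvAdvance board col n r < n ∧
        pvCell board (pvAdvance board col n r) col = some v ∧
        colFrom board n col (pvAdvance board col n r + 1) = rest) := by
  have key : ∀ (k : Nat) (r : Int), (n - r).toNat = k → 0 ≤ r →
      (colFrom board n col r = [] → ¬ pvAdvance board col n r < n) ∧
      (∀ v rest, colFrom board n col r = v :: rest →
        r ≤ pvAdvance board col n r ∧ pvAdvance board col n r < n ∧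
        pvCell board (pvAdvance board col n r) col = some v ∧
        colFrom board n col (pvAdvance board col n r + 1) = rest) := by
    intro k
    induction k using Nat.strong_induction_on with
    | _ k ih =>
      intro r hk hr0
      by_cases hrn : r < n
      · obtain ⟨v, hv⟩ := Option.isSome_iff_exists.mp (hcell r hr0 hrn)
        by_cases hv0 : v = 0
        · have hcol : colFrom board n col r = colFrom board n col (r + 1) := by
            rw [colFrom]; simp [hrn, hv, hv0]
          have hadv : pvAdvance board col n r = pvAdvance board col n (r + 1) := by
            rw [pvAdvance]; simp [hrn, hv, hv0]
          have hprev := ih (n - (r + 1)).toNat (by omega) (r + 1) rfl (by omega)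
          rw [hcol, hadv]
          refine ⟨hprev.1, fun v' rest h => ?_⟩
          obtain ⟨h1, h2, h3, h4⟩ := hprev.2 v' rest h
          exact ⟨by omega, h2, h3, h4⟩
        · have hcol : colFrom board n col r = v :: colFrom board n col (r + 1) := by
            rw [colFrom]; simp [hrn, hv, hv0]
          have hadv : pvAdvance board col n r = r := by
            rw [pvAdvance]; simp [hrn, hv, hv0]
          constructor
          · intro h; rw [hcol] at h; simp at h
          · intro v' rest h
            rw [hcol] at h
            rw [hadv]
            injection h with h1 h2
            exact ⟨le_refl r, hrn, by rw [h1] at hv; exact hv, h2⟩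
      · have hcol : colFrom board n col r = [] := by rw [colFrom]; simp [hrn]
        have hadv : pvAdvance board col n r = r := by rw [pvAdvance]; simp [hrn]
        constructor
        · intro _; rw [hadv]; exact hrn
        · intro v rest h; rw [hcol] at h; simp at h
  intro r hr0
  exact key (n - r).toNat r rfl hr0

lemma two_tail : ∀ (s : List Int), 2 ≤ s.length → ∃ ys x y, s = ys ++ [x, y] := by
  intro s
  induction s with
  | nil => intro h; simp at h
  | cons a t ih =>
    intro h
    match t, h with
    | [b], _ => exact ⟨[], a, b, rfl⟩
    | b :: c :: u, _ =>
      obtain ⟨ys, x, y, hy⟩ := ih (by simp)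
      exact ⟨a :: ys, x, y, by rw [List.cons_append, hy]⟩

lemma pyGet_neg_two (ys : List Int) (x y : Int) :
    PySem.List.pyGet? (ys ++ [x, y]) (-2) = some x := by
  have hlen : 2 ≤ (ys ++ [x, y]).length := by simp
  rw [PySem.List.pyGet?_neg_ofNat (ys ++ [x, y]) 2 (by omega) hlen]
  have h2 : (ys ++ [x, y]).length - 2 = ys.length := by simp
  rw [h2, List.getElem?_append_right (le_refl ys.length)]
  simp

lemma chain_no_pair (s : List Int) (h : List.IsChain (· ≠ ·) s) :
    ¬ (2 ≤ s.length ∧ PySem.List.pyGet? s (-1) = PySem.List.pyGet? s (-2)) := by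
  rintro ⟨hl, he⟩
  obtain ⟨ys, x, y, rfl⟩ := two_tail s hl
  rw [pyGet_neg_two, PySem.List.pyGet?_neg_one] at he
  have hy : (ys ++ [x, y]).getLast? = some y := by
    rw [show ys ++ [x, y] = (ys ++ [x]) ++ [y] by simp, List.getLast?_concat]
  rw [hy] at he
  have hxy : x ≠ y := by
    have := (List.isChain_append.mp h).2.1
    simpa using this
  exact hxy (by injection he with h'; omega)

-- A's pair-check condition on stack ++ [v] is "the old top equals v"
lemma pair_cond (stack : List Int) (v : Int) :
    (2 ≤ (stack ++ [v]).length ∧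
      PySem.List.pyGet? (stack ++ [v]) (-1) = PySem.List.pyGet? (stack ++ [v]) (-2)) ↔
    stack.getLast? = some v := by
  rcases List.eq_nil_or_concat stack with rfl | ⟨ys, w, hys⟩
  · simp
  · rw [List.concat_eq_append] at hys
    subst hys
    have h2 : PySem.List.pyGet? ((ys ++ [w]) ++ [v]) (-2) = some w := by
      rw [List.append_assoc]; exact pyGet_neg_two ys w v
    rw [h2, PySem.List.pyGet?_neg_one_append_singleton, List.getLast?_concat]
    constructor
    · rintro ⟨_, h⟩; injection h with h'; rw [h']
    · intro h; injection h with h'; exact ⟨by simp, by rw [h']⟩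

-- the main loop invariant transfer: A's fold and B's fold produce the same counter
lemma fold_eq (board : List (List Int)) (n : Int) (hn : n = (board.length : Int))
    (hpre : ∀ row ∈ board, board.length ≤ row.length) :
    ∀ (moves : List Int) (dic : PySem.Dict Int (List Int)) (top stack : List Int) (ans : Int),
      top.length = board.length →
      (∀ j : Int, 0 ≤ j → j < n → 0 ≤ (PySem.List.pyGet? top j).getD 0) →
      (∀ j : Int, dic.getD j [] =
        if 0 ≤ j ∧ j < n then (colFrom board n j ((PySem.List.pyGet? top j).getD 0)).reverse
        else []) →
      List.IsChain (· ≠ ·) stack →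
      (moves.foldl solAStep (dic, stack, ans)).2.2 =
        (moves.foldl (solBStep board n) (top, stack, ans)).2.2 := by
  intro moves
  induction moves with
  | nil => intro dic top stack ans _ _ _ _; rfl
  | cons m ms ih =>
    intro dic top stack ans hlen htop hdic hch
    simp only [List.foldl_cons]
    by_cases hcol : 0 ≤ m - 1 ∧ m - 1 < n
    · obtain ⟨hc0, hcn⟩ := hcol
      have hcell : ∀ i : Int, 0 ≤ i → i < n → (pvCell board i (m - 1)).isSome := by
        intro i h1 h2
        obtain ⟨v, hv⟩ := cell_isSome board i (m - 1) hpre h1 (by omega) hc0 (by omega)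
        simp [hv]
      have ht0 : 0 ≤ (PySem.List.pyGet? top (m - 1)).getD 0 := htop _ hc0 hcn
      have hl : dic.getD (m - 1) [] =
          (colFrom board n (m - 1) ((PySem.List.pyGet? top (m - 1)).getD 0)).reverse := by
        rw [hdic]; rw [if_pos ⟨hc0, hcn⟩]
      cases hcf : colFrom board n (m - 1) ((PySem.List.pyGet? top (m - 1)).getD 0) with
      | nil =>
        have hnadv := (adv_spec board n (m - 1) hcell _ ht0).1 hcf
        have h0 : ¬ 0 < (([] : List Int).reverse).length := by simp
        have hA : solAStep (dic, stack, ans) m = (dic, stack, ans) := by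
          simp only [solAStep, hl, hcf]
          rw [if_neg h0, if_neg h0, if_neg (chain_no_pair stack hch)]
        have hB : solBStep board n (top, stack, ans) m = (top, stack, ans) := by
          simp only [solBStep]
          rw [if_pos ⟨hc0, hcn⟩, if_neg hnadv]
        rw [hA, hB]
        exact ih dic top stack ans hlen htop hdic hch
      | cons v rest =>
        obtain ⟨hrle, hrlt, hcv, hrest⟩ := (adv_spec board n (m - 1) hcell _ ht0).2 v rest hcf
        set r := pvAdvance board (m - 1) n ((PySem.List.pyGet? top (m - 1)).getD 0) with hrdef
        have hlv : dic.getD (m - 1) [] = rest.reverse ++ [v] := by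
          rw [hl, hcf, List.reverse_cons]
        have hA : solAStep (dic, stack, ans) m =
            (if stack.getLast? = some v
             then (dic.insert (m - 1) rest.reverse, stack.dropLast, ans + 1)
             else (dic.insert (m - 1) rest.reverse, stack ++ [v], ans)) := by
          simp only [solAStep, hlv]
          have hlp : 0 < (rest.reverse ++ [v]).length := by simp
          rw [if_pos hlp, if_pos hlp, List.getLast?_concat]
          simp only [Option.getD_some]
          by_cases hp : stack.getLast? = some v
          · rw [if_pos ((pair_cond stack v).mpr hp), if_pos hp, List.dropLast_concat,
              List.dropLast_concat]
          · rw [if_neg (fun hc => hp ((pair_cond stack v).mp hc)), if_neg hp,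
              List.dropLast_concat]
        have hB : solBStep board n (top, stack, ans) m =
            (if stack.getLast? = some v
             then (PySem.List.pySetD top (m - 1) (r + 1), stack.dropLast, ans + 1)
             else (PySem.List.pySetD top (m - 1) (r + 1), stack ++ [v], ans)) := by
          simp only [solBStep]
          rw [if_pos ⟨hc0, hcn⟩, ← hrdef, if_pos hrlt, hcv]
          simp only [Option.getD_some]
          by_cases hp : stack.getLast? = some v
          · have hne : stack ≠ [] := by rintro rfl; simp at hp
            rw [if_pos ⟨hne, by rw [PySem.List.pyGet?_neg_one]; exact hp⟩, if_pos hp]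
          · rw [if_neg (fun hc => hp (by rw [← PySem.List.pyGet?_neg_one stack]; exact hc.2)),
              if_neg hp]
        have hsetD : ∀ j : Int, 0 ≤ j → j < n →
            (PySem.List.pyGet? (PySem.List.pySetD top (m - 1) (r + 1)) j).getD 0 =
            if j = m - 1 then r + 1 else (PySem.List.pyGet? top j).getD 0 := by
          intro j h1 h2
          rw [PySem.List.pySetD_of_nonneg _ _ hc0, PySem.List.pyGet?_of_nonneg _ h1,
            List.getElem?_set]
          by_cases hj : j = m - 1
          · rw [if_pos (by omega : (m - 1).toNat = j.toNat),
              if_pos (show (m - 1).toNat < top.length by omega), if_pos hj]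
            simp
          · rw [if_neg (by omega : ¬ (m - 1).toNat = j.toNat), if_neg hj,
              ← PySem.List.pyGet?_of_nonneg _ h1]
        have hlen2 : (PySem.List.pySetD top (m - 1) (r + 1)).length = board.length := by
          rw [PySem.List.pySetD_of_nonneg _ _ hc0, List.length_set, hlen]
        have htop2 : ∀ j : Int, 0 ≤ j → j < n →
            0 ≤ (PySem.List.pyGet? (PySem.List.pySetD top (m - 1) (r + 1)) j).getD 0 := by
          intro j h1 h2
          rw [hsetD j h1 h2]
          by_cases hj : j = m - 1
          · rw [if_pos hj]; omega
          · rw [if_neg hj]; exact htop j h1 h2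
        have hdic2 : ∀ j : Int, (dic.insert (m - 1) rest.reverse).getD j [] =
            if 0 ≤ j ∧ j < n then
              (colFrom board n j
                ((PySem.List.pyGet? (PySem.List.pySetD top (m - 1) (r + 1)) j).getD 0)).reverse
            else [] := by
          intro j
          rw [PySem.Dict.getD_insert]
          by_cases hj : j = m - 1
          · rw [if_pos hj, if_pos (show 0 ≤ j ∧ j < n by omega),
              hsetD j (by omega) (by omega), if_pos hj, hj, hrest]
          · rw [if_neg hj, hdic j]
            by_cases hjr : 0 ≤ j ∧ j < n
            · rw [if_pos hjr, if_pos hjr, hsetD j hjr.1 hjr.2, if_neg hj]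
            · rw [if_neg hjr, if_neg hjr]
        rw [hA, hB]
        by_cases hp : stack.getLast? = some v
        · rw [if_pos hp, if_pos hp]
          exact ih _ _ _ _ hlen2 htop2 hdic2 (hch.prefix (List.dropLast_prefix stack))
        · rw [if_neg hp, if_neg hp]
          refine ih _ _ _ _ hlen2 htop2 hdic2 ?_
          rw [List.isChain_append]
          refine ⟨hch, by simp, ?_⟩
          intro x hx y hy
          simp only [List.head?_cons, Option.mem_def, Option.some.injEq] at hy
          subst hy
          intro hxy
          exact hp (by rw [Option.mem_def.mp hx, hxy])
    · have hl : dic.getD (m - 1) [] = [] := by rw [hdic]; rw [if_neg hcol]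
      have h0 : ¬ 0 < (([] : List Int)).length := by simp
      have hA : solAStep (dic, stack, ans) m = (dic, stack, ans) := by
        simp only [solAStep, hl]
        rw [if_neg h0, if_neg h0, if_neg (chain_no_pair stack hch)]
      have hB : solBStep board n (top, stack, ans) m = (top, stack, ans) := by
        simp only [solBStep]
        rw [if_neg hcol]
      rw [hA, hB]
      exact ih dic top stack ans hlen htop hdic hch

-- the nonzero singleton/empty contribution of one cell
def cellPart (b : List (List Int)) (i j : Int) : List Int :=
  match pvCell b i j with
  | some v => if v = 0 then [] else [v]
  | none => []

lemma cell_reverse (board : List (List Int)) (n i j : Int) (hn : n = (board.length : Int))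
    (h0 : 0 ≤ i) (hi : i < n) :
    pvCell board.reverse i j = pvCell board (n - 1 - i) j := by
  simp only [pvCell]
  rw [PySem.List.pyGet?_of_nonneg _ h0,
    PySem.List.pyGet?_of_nonneg _ (show (0:Int) ≤ n - 1 - i by omega)]
  rw [List.getElem?_reverse (show i.toNat < board.length by omega)]
  have hidx : board.length - 1 - i.toNat = (n - 1 - i).toNat := by omega
  rw [hidx]

-- one row of A's build pass: what it appends to each column list
lemma inner_build (b : List (List Int)) (n i : Int)
    (hcelli : ∀ j : Int, 0 ≤ j → j < n → (pvCell b i j).isSome) :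
    ∀ (k : Nat), (k : Int) ≤ n → ∀ (d : PySem.Dict Int (List Int)) (j : Int),
      ((PySem.List.pyRange 0 (k : Int) 1).foldl (fun dic j =>
        match pvCell b i j with
        | some v => if v ≠ 0 then dic.insert j (dic.getD j [] ++ [v]) else dic
        | none => dic) d).getD j [] =
      d.getD j [] ++ (if 0 ≤ j ∧ j < (k : Int) then cellPart b i j else []) := by
  intro k
  induction k with
  | zero =>
    intro _ d j
    rw [Nat.cast_zero, PySem.List.pyRange_one_eq_nil (le_refl 0), List.foldl_nil,
      if_neg (by omega : ¬ (0 ≤ j ∧ j < (0:Int)))]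
    simp
  | succ k ihk =>
    intro hk d j
    have hsplit : PySem.List.pyRange 0 ((k + 1 : Nat) : Int) 1 =
        PySem.List.pyRange 0 (k : Int) 1 ++ [(k : Int)] := by
      push_cast
      exact PySem.List.pyRange_one_succ_right (by omega)
    rw [hsplit, List.foldl_append, List.foldl_cons, List.foldl_nil]
    obtain ⟨v, hv⟩ := Option.isSome_iff_exists.mp (hcelli (k : Int) (by omega) (by omega))
    simp only [hv]
    by_cases hv0 : v ≠ 0
    · rw [if_pos hv0, PySem.Dict.getD_insert]
      by_cases hj : j = (k : Int)
      · rw [hj, if_pos rfl, ihk (by omega) d (k : Int),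
          if_neg (by omega : ¬ (0 ≤ (k : Int) ∧ (k : Int) < (k : Int))),
          if_pos (show 0 ≤ (k : Int) ∧ (k : Int) < ((k + 1 : Nat) : Int) by push_cast; omega)]
        simp only [cellPart, hv, if_neg hv0]
        simp
      · rw [if_neg hj, ihk (by omega) d j]
        by_cases hjr : 0 ≤ j ∧ j < (k : Int)
        · rw [if_pos hjr, if_pos (show 0 ≤ j ∧ j < ((k + 1 : Nat) : Int) by push_cast; omega)]
        · rw [if_neg hjr, if_neg (show ¬ (0 ≤ j ∧ j < ((k + 1 : Nat) : Int)) by push_cast; omega)]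
    · have hv0' : v = 0 := by omega
      rw [if_neg hv0, ihk (by omega) d j]
      by_cases hj : j = (k : Int)
      · rw [hj, if_neg (by omega : ¬ (0 ≤ (k : Int) ∧ (k : Int) < (k : Int))),
          if_pos (show 0 ≤ (k : Int) ∧ (k : Int) < ((k + 1 : Nat) : Int) by push_cast; omega)]
        simp only [cellPart, hv, if_pos hv0']
      · by_cases hjr : 0 ≤ j ∧ j < (k : Int)
        · rw [if_pos hjr, if_pos (show 0 ≤ j ∧ j < ((k + 1 : Nat) : Int) by push_cast; omega)]
        · rw [if_neg hjr, if_neg (show ¬ (0 ≤ j ∧ j < ((k + 1 : Nat) : Int)) by push_cast; omega)]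

lemma inner_build' (b : List (List Int)) (n i : Int)
    (hcelli : ∀ j : Int, 0 ≤ j → j < n → (pvCell b i j).isSome)
    (c : Int) (hc0 : 0 ≤ c) (hcn : c ≤ n)
    (d : PySem.Dict Int (List Int)) (j : Int) :
    ((PySem.List.pyRange 0 c 1).foldl (fun dic j =>
      match pvCell b i j with
      | some v => if v ≠ 0 then dic.insert j (dic.getD j [] ++ [v]) else dic
      | none => dic) d).getD j [] =
    d.getD j [] ++ (if 0 ≤ j ∧ j < c then cellPart b i j else []) := by
  have h := inner_build b n i hcelli c.toNat (by omega) d j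
  rw [show ((c.toNat : Nat) : Int) = c from by omega] at h
  exact h

-- A's dict-build pass yields exactly the reversed column lists
lemma build_eq (board : List (List Int)) (n : Int) (hn : n = (board.length : Int))
    (hpre : ∀ row ∈ board, board.length ≤ row.length) :
    ∀ j : Int,
      (((PySem.List.pyRange 0 n 1).foldl (fun dic i =>
        (PySem.List.pyRange 0 n 1).foldl (fun dic j =>
          match pvCell board.reverse i j with
          | some v => if v ≠ 0 then dic.insert j (dic.getD j [] ++ [v]) else dic
          | none => dic) dic) (PySem.Dict.empty (κ := Int) (ν := List Int))).getD j []) =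
      if 0 ≤ j ∧ j < n then (colFrom board n j 0).reverse else [] := by
  have hcell : ∀ i j : Int, 0 ≤ i → i < n → 0 ≤ j → j < n →
      (pvCell board.reverse i j).isSome := by
    intro i j h1 h2 h3 h4
    obtain ⟨v, hv⟩ := cell_isSome board.reverse i j
      (by intro row hr; rw [List.length_reverse]; exact hpre row (List.mem_reverse.mp hr))
      h1 (by rw [List.length_reverse]; omega) h3 (by rw [List.length_reverse]; omega)
    simp [hv]
  have key : ∀ (k : Nat), (k : Int) ≤ n → ∀ j : Int,
      (((PySem.List.pyRange 0 (k : Int) 1).foldl (fun dic i =>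
        (PySem.List.pyRange 0 n 1).foldl (fun dic j =>
          match pvCell board.reverse i j with
          | some v => if v ≠ 0 then dic.insert j (dic.getD j [] ++ [v]) else dic
          | none => dic) dic) (PySem.Dict.empty (κ := Int) (ν := List Int))).getD j []) =
      if 0 ≤ j ∧ j < n then (colFrom board n j (n - k)).reverse else [] := by
    intro k
    induction k with
    | zero =>
      intro _ j
      rw [Nat.cast_zero, PySem.List.pyRange_one_eq_nil (le_refl 0), List.foldl_nil,
        PySem.Dict.getD_empty]
      have hcf : colFrom board n j (n - 0) = [] := by
        rw [colFrom]; simp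
      rw [hcf, List.reverse_nil]
      simp
    | succ k ihk =>
      intro hk j
      have hsplit : PySem.List.pyRange 0 ((k + 1 : Nat) : Int) 1 =
          PySem.List.pyRange 0 (k : Int) 1 ++ [(k : Int)] := by
        push_cast
        exact PySem.List.pyRange_one_succ_right (by omega)
      rw [hsplit, List.foldl_append, List.foldl_cons, List.foldl_nil]
      rw [inner_build' board.reverse n (k : Int)
        (fun j h1 h2 => hcell (k : Int) j (by omega) (by omega) h1 h2) n (by omega) (le_refl n) _ j]
      rw [ihk (by omega) j]
      by_cases hjr : 0 ≤ j ∧ j < n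
      · rw [if_pos hjr, if_pos hjr, if_pos hjr]
        have hrow : pvCell board.reverse (k : Int) j = pvCell board (n - 1 - k) j :=
          cell_reverse board n (k : Int) j hn (by omega) (by omega)
        obtain ⟨v, hv⟩ := Option.isSome_iff_exists.mp
          (hcell (k : Int) j (by omega) (by omega) hjr.1 hjr.2)
        have hcv2 : pvCell board (n - ((k + 1 : Nat) : Int)) j = some v := by
          rw [show n - ((k + 1 : Nat) : Int) = n - 1 - (k : Int) by push_cast; ring]
          rw [← hrow]; exact hv
        have hcf : colFrom board n j (n - ((k + 1 : Nat) : Int)) =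
            (if v = 0 then colFrom board n j (n - (k : Int))
             else v :: colFrom board n j (n - (k : Int))) := by
          rw [colFrom, if_pos (show n - ((k + 1 : Nat) : Int) < n by push_cast; omega)]
          simp only [hcv2]
          rw [show n - ((k + 1 : Nat) : Int) + 1 = n - (k : Int) by push_cast; ring]
        rw [hcf]
        simp only [cellPart, hv]
        by_cases hv0 : v = 0
        · rw [if_pos hv0, if_pos hv0]; simp
        · rw [if_neg hv0, if_neg hv0, List.reverse_cons]
      · rw [if_neg hjr, if_neg hjr, if_neg hjr]
        simp
  intro j
  have h := key n.toNat (by omega) j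
  rw [show ((n.toNat : Nat) : Int) = n from by omega] at h
  rw [show n - n = (0 : Int) from by ring] at h
  exact h

-- ===== VERDICT (by name: the statement is the Claim_ definition above) =====
theorem solution_spec : Claim_equal_solution := by
  intro board moves _ hpre
  have hz : ∀ j : Int,
      (PySem.List.pyGet? (List.replicate board.length (0 : Int)) j).getD 0 = 0 := by
    intro j
    cases h : PySem.List.pyGet? (List.replicate board.length (0 : Int)) j with
    | none => rfl
    | some x =>
      have hm := PySem.List.mem_of_pyGet?_eq_some _ h
      simp [List.eq_of_mem_replicate hm]
  have hfold := fold_eq board (board.length : Int) rfl hpre moves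
    ((PySem.List.pyRange 0 ((board.length : Int)) 1).foldl (fun dic i =>
      (PySem.List.pyRange 0 ((board.length : Int)) 1).foldl (fun dic j =>
        match pvCell board.reverse i j with
        | some v => if v ≠ 0 then dic.insert j (dic.getD j [] ++ [v]) else dic
        | none => dic) dic) PySem.Dict.empty)
    (List.replicate board.length 0) [] 0
    List.length_replicate
    (fun j _ _ => by rw [hz j])
    (by
      intro j
      rw [hz j]
      exact build_eq board (board.length : Int) rfl hpre j)
    (by simp)
  unfold Spec_solution solution solution_alt
  simp only [PySem.List.slice?_none_none_neg_one, Option.getD_some, List.length_reverse]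
  rw [hfold]
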